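-- pv_equiv track=rewrite | github.com/jashmerchant/sliding-window | s1.py | first_neg_brute
-- ===== SOURCE A (Python) =====
-- def first_neg_brute(arr, k):
--     neg_list = []
--     for i in range(0, len(arr) - k + 1):
--         for j in range(i, i + k):
--             if arr[j] < 0:
--                 neg_list.append(arr[j])
--                 break
--             elif j == i + k - 1:
--                 neg_list.append(0)
--     return neg_list
-- ===== SOURCE B (Python) =====
-- def first_neg_brute(arr, k):
--     # Two-pass O(n): nxt[i] = index of first negative element at or after i (n = none).
--     if k <= 0:
--         return []
--     n = len(arr)
--     nxt = [n] * (n + 1)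
--     for i in range(n - 1, -1, -1):
--         nxt[i] = i if arr[i] < 0 else nxt[i + 1]
--     return [arr[nxt[i]] if nxt[i] < i + k else 0 for i in range(n - k + 1)]
-- ===== Notes on version B (the rewrite author's own statement) =====
-- stated objective: faster
-- what changed: Replaces the nested per-window scan with a single backward pass computing, for each position, the index of the next negative element, then reads each window's answer in O(1).
import Mathlib
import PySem

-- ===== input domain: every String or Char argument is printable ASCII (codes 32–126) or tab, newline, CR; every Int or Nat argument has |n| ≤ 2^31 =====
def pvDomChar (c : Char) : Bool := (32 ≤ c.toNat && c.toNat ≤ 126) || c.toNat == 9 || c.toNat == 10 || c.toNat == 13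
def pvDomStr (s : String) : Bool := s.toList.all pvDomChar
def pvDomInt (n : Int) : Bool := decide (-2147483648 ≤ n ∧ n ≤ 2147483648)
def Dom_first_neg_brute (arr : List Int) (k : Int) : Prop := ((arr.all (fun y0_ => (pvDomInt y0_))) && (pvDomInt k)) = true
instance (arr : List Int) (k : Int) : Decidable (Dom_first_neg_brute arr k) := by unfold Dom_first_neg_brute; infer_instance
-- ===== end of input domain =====

-- B replaces A's O(n*k) per-window scan by a backward "next negative index" pass plus O(1) per window.

-- ===== PORT A =====
-- inner 'for j in range(i, i+k)' loop of A; hi = i + k; arr[j] is in range wherever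
-- Python reaches it, so '.getD 0' is never the raising case
def innerA (arr : List Int) (hi : Int) : List Int → List Int
  | [] => []
  | j :: rest =>
    let v := (PySem.List.pyGet? arr j).getD 0
    if v < 0 then [v]
    else if j = hi - 1 then 0 :: innerA arr hi rest
    else innerA arr hi rest

def first_neg_brute (arr : List Int) (k : Int) : List Int :=
  (PySem.List.pyRange 0 ((arr.length : Int) - k + 1) 1).foldl
    (fun acc i => acc ++ innerA arr (i + k) (PySem.List.pyRange i (i + k) 1)) []

-- ===== PORT B =====
-- backward pass of Source B: buildNxt arr i0 is the nxt-array for the suffix starting at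
-- absolute index i0 (length arr.length + 1, sentinel last entry)
def buildNxt (arr : List Int) (i0 : Int) : List Int :=
  match arr with
  | [] => [i0]
  | x :: rest =>
    let tail := buildNxt rest (i0 + 1)
    (if x < 0 then i0 else tail.headD (i0 + 1)) :: tail

def first_neg_brute_alt (arr : List Int) (k : Int) : List Int :=
  if k ≤ 0 then []
  else
    let n : Int := (arr.length : Int)
    let nxt := buildNxt arr 0
    (PySem.List.pyRange 0 (n - k + 1) 1).map (fun i =>
      let t := (PySem.List.pyGet? nxt i).getD n
      if t < i + k then (PySem.List.pyGet? arr t).getD 0 else 0)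

-- ===== PRECONDITION & SPEC =====
def Spec_first_neg_brute (arr : List Int) (k : Int) (out : List Int) : Prop := out = first_neg_brute_alt arr k
instance (arr : List Int) (k : Int) (out : List Int) : Decidable (Spec_first_neg_brute arr k out) := by unfold Spec_first_neg_brute; infer_instance

-- ===== CLAIM (what is proved, stated in full; the proofs are below) =====
def Claim_equal_first_neg_brute : Prop := ∀ (arr : List Int) (k : Int), Dom_first_neg_brute arr k → Spec_first_neg_brute arr k (first_neg_brute arr k)

-- ===== LEMMAS AND PROOFS =====

-- spec of the backward pass: first index ≥ i0 holding a negative (i0 = absolute index of the head)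
def fneg : List Int → Int → Int
  | [], i0 => i0
  | x :: rest, i0 => if x < 0 then i0 else fneg rest (i0 + 1)

lemma fneg_ge (arr : List Int) (i0 : Int) : i0 ≤ fneg arr i0 := by
  induction arr generalizing i0 with
  | nil => simp [fneg]
  | cons x rest ih =>
    simp only [fneg]
    split
    · omega
    · have := ih (i0 + 1); omega

lemma buildNxt_headD (arr : List Int) (i0 d : Int) :
    (buildNxt arr i0).headD d = fneg arr i0 := by
  induction arr generalizing i0 d with
  | nil => simp [buildNxt, fneg]
  | cons x rest ih => simp only [buildNxt, List.headD_cons, fneg, ih]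

lemma buildNxt_eq_map (arr : List Int) (i0 : Int) :
    buildNxt arr i0 = (List.range (arr.length + 1)).map (fun m => fneg (arr.drop m) (i0 + m)) := by
  induction arr generalizing i0 with
  | nil => simp [buildNxt, fneg]
  | cons x rest ih =>
    have hr : List.range (rest.length + 1 + 1) = 0 :: (List.range (rest.length + 1)).map Nat.succ :=
      List.range_succ_eq_map
    simp only [buildNxt]
    rw [buildNxt_headD]
    simp only [ih, List.length_cons, hr, List.map_cons, List.map_map]
    refine List.cons_eq_cons.mpr ⟨?_, ?_⟩
    · simp [fneg]
    · apply List.map_congr_left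
      intro m _
      simp only [Function.comp_apply, List.drop_succ_cons, Nat.cast_succ]
      ring_nf

lemma nxt_get (arr : List Int) (m : Nat) (hm : m ≤ arr.length) :
    PySem.List.pyGet? (buildNxt arr 0) (m : Int) = some (fneg (arr.drop m) m) := by
  rw [buildNxt_eq_map]
  rw [PySem.List.pyGet?_natCast]
  rw [List.getElem?_map]
  rw [List.getElem?_range (by omega)]
  simp

-- A's inner loop over range(j, hi) computes the first-negative value of that window
lemma window_eq (arr : List Int) (hi : Int) (hhi : hi ≤ (arr.length : Int)) :
    ∀ (j : Int), 0 ≤ j → j ≤ hi →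
      innerA arr hi (PySem.List.pyRange j hi 1) =
        (if fneg (arr.drop j.toNat) j < hi then
          [(PySem.List.pyGet? arr (fneg (arr.drop j.toNat) j)).getD 0]
         else if j < hi then [0] else []) := by
  intro j hj0 hjhi
  induction hn : (hi - j).toNat generalizing j with
  | zero =>
    have hge : hi ≤ j := by omega
    have hj : j = hi := le_antisymm hjhi hge
    rw [PySem.List.pyRange_one_eq_nil (by omega)]
    have := fneg_ge (arr.drop j.toNat) j
    simp only [innerA]
    rw [if_neg (by omega), if_neg (by omega)]
  | succ d ih =>
    have hjlt : j < hi := by omega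
    have hjn : j.toNat < arr.length := by omega
    rw [PySem.List.pyRange_one_cons hjlt]
    have hdrop : arr.drop j.toNat = arr[j.toNat] :: arr.drop (j.toNat + 1) :=
      (List.getElem_cons_drop hjn).symm
    have hget : PySem.List.pyGet? arr j = some arr[j.toNat] :=
      PySem.List.pyGet?_eq_some_getElem arr hj0 (by omega)
    have htn : (j + 1).toNat = j.toNat + 1 := by omega
    simp only [innerA, hget, Option.getD_some]
    by_cases hneg : arr[j.toNat] < 0
    · rw [if_pos hneg]
      rw [hdrop]
      simp only [fneg, if_pos hneg]
      rw [if_pos hjlt, hget]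
      simp
    · rw [if_neg hneg]
      have hfneg : fneg (arr.drop j.toNat) j = fneg (arr.drop (j.toNat + 1)) (j + 1) := by
        rw [hdrop]; simp [fneg, hneg]
      have ihres := ih (j + 1) (by omega) (by omega) (by omega)
      rw [htn] at ihres
      by_cases hlast : j = hi - 1
      · rw [if_pos hlast]
        have hrest : PySem.List.pyRange (j + 1) hi 1 = [] :=
          PySem.List.pyRange_one_eq_nil (by omega)
        rw [hrest]
        have hge := fneg_ge (arr.drop (j.toNat + 1)) (j + 1)
        simp only [innerA]
        rw [hfneg, if_neg (by omega), if_pos hjlt]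
      · rw [if_neg hlast]
        rw [ihres, hfneg]
        have hj1 : j + 1 < hi := by omega
        by_cases ht : fneg (arr.drop (j.toNat + 1)) (j + 1) < hi
        · rw [if_pos ht, if_pos ht]
        · rw [if_neg ht, if_neg ht, if_pos hj1, if_pos hjlt]

-- flatMap of singleton bodies is a map
lemma flatMap_singleton_of_mem {α β : Type} (l : List α) (g : α → List β) (f : α → β)
    (h : ∀ x ∈ l, g x = [f x]) : l.flatMap g = l.map f := by
  induction l with
  | nil => simp
  | cons x xs ih =>
    simp only [List.flatMap_cons, List.map_cons, h x (by simp)]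
    rw [ih (fun y hy => h y (by simp [hy]))]
    rfl

theorem first_neg_brute_eq (arr : List Int) (k : Int) :
    first_neg_brute arr k = first_neg_brute_alt arr k := by
  unfold first_neg_brute first_neg_brute_alt
  by_cases hk : k ≤ 0
  · rw [if_pos hk, PySem.List.foldl_append_eq_flatMap, List.nil_append]
    rw [List.flatMap_eq_nil_iff.mpr]
    intro i _
    rw [PySem.List.pyRange_one_eq_nil (by omega)]
    simp [innerA]
  · rw [if_neg hk]
    rw [PySem.List.foldl_append_eq_flatMap, List.nil_append]
    apply flatMap_singleton_of_mem
    intro i hi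
    rw [PySem.List.mem_pyRange_one] at hi
    have hik : i + k ≤ (arr.length : Int) := by omega
    rw [window_eq arr (i + k) hik i hi.1 (by omega)]
    have hget := nxt_get arr i.toNat (by omega)
    have hcast : ((i.toNat : Int)) = i := by omega
    rw [hcast] at hget
    simp only [hget, Option.getD_some]
    rw [if_pos (by omega : i < i + k)]
    split <;> rfl

-- ===== VERDICT (by name: the statement is the Claim_ definition above) =====
theorem first_neg_brute_spec : Claim_equal_first_neg_brute := by
  intro arr k _
  exact first_neg_brute_eq arr k
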